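-- pv_equiv track=rewrite | github.com/derfleischer/kettentoolneu | neueskettentool/chain_tool_v4/algorithms/delaunay_3d.py | _extract_polygon_from_triangles
-- ===== SOURCE A (Python) =====
-- from typing import List, Tuple, Dict, Optional, Set, Any, Union
--
-- def _extract_polygon_from_triangles(triangles: List[Tuple[int, int, int]]) -> List[int]:
--     """Extrahiert Polygon-Rand aus Dreiecks-Liste"""
--     # Edge-Count für Rand-Erkennung
--     edge_count = {}
--     for triangle in triangles:
--         for i in range(3):
--             edge = tuple(sorted([triangle[i], triangle[(i + 1) % 3]]))
--             edge_count[edge] = edge_count.get(edge, 0) + 1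
--
--     # Rand-Edges (nur einmal verwendet)
--     boundary_edges = [edge for edge, count in edge_count.items() if count == 1]
--
--     # Ordne Edges zu geschlossenem Polygon
--     if not boundary_edges:
--         return []
--
--     polygon = [boundary_edges[0][0], boundary_edges[0][1]]
--     used_edges = {boundary_edges[0]}
--
--     while len(used_edges) < len(boundary_edges):
--         last_vertex = polygon[-1]
--
--         # Finde nächste verbundene Edge
--         next_edge = None
--         for edge in boundary_edges:
--             if edge not in used_edges:
--                 if edge[0] == last_vertex:
--                     next_edge = edge
--                     polygon.append(edge[1])
--                     break
--                 elif edge[1] == last_vertex: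
--                     next_edge = edge
--                     polygon.append(edge[0])
--                     break
--
--         if next_edge:
--             used_edges.add(next_edge)
--         else:
--             break  # Kein geschlossenes Polygon möglich
--
--     return polygon[:-1]  # Entferne letzten (doppelten) Punkt
-- ===== SOURCE B (Python) =====
-- def _extract_polygon_from_triangles(triangles):
--     # Count each undirected edge; boundary edges are those used exactly once.
--     edge_count = {}
--     for a, b, c in triangles:
--         for u, v in ((a, b), (b, c), (c, a)):
--             e = (u, v) if u <= v else (v, u)
--             edge_count[e] = edge_count.get(e, 0) + 1
--     boundary = [e for e, cnt in edge_count.items() if cnt == 1]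
--     if not boundary:
--         return []
--     # Adjacency map vertex -> incident (edge, other endpoint), in boundary order.
--     adj = {}
--     for (u, v) in boundary:
--         adj.setdefault(u, []).append(((u, v), v))
--         if u != v:
--             adj.setdefault(v, []).append(((u, v), u))
--     first = boundary[0]
--     polygon = [first[0], first[1]]
--     used = {first}
--     for _ in range(len(boundary) - 1):
--         last = polygon[-1]
--         nxt = next(((e, o) for e, o in adj.get(last, ()) if e not in used), None)
--         if nxt is None:
--             break
--         used.add(nxt[0])
--         polygon.append(nxt[1])
--     return polygon[:-1]
-- ===== Notes on version B (the rewrite author's own statement) =====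
-- stated objective: faster
-- what changed: B replaces A's repeated full scan of the boundary-edge list per polygon step by a vertex->incident-edges adjacency map built once, so each step only inspects edges incident to the current vertex.
import Mathlib
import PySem

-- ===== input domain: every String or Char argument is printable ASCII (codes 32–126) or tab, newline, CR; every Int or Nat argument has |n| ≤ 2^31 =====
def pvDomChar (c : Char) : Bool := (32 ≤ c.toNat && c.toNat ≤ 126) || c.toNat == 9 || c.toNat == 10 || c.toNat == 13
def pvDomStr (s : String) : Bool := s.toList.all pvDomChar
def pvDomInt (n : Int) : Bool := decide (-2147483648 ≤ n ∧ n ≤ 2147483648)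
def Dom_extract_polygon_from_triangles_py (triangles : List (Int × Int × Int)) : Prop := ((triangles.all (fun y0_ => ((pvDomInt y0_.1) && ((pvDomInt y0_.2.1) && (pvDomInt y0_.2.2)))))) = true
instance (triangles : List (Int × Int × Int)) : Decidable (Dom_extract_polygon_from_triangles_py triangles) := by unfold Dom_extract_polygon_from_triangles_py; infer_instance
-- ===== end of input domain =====

-- B builds a vertex->incident-edges adjacency map once and walks it, instead of A's rescan of
-- the whole boundary-edge list at every polygon step (objective: faster).

-- ===== PORT A =====
-- tuple(sorted([x, y]))
def pvSortEdge (x y : Int) : Int × Int := if x ≤ y then (x, y) else (y, x)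

-- triangle[i] for i in 0..2
def pvTriIdx (t : Int × Int × Int) (i : Nat) : Int :=
  match i with | 0 => t.1 | 1 => t.2.1 | _ => t.2.2

-- edge_count loop of A
def pvCountA (triangles : List (Int × Int × Int)) : PySem.Dict (Int × Int) Int :=
  triangles.foldl (fun d t =>
    (PySem.List.pyRange 0 3 1).foldl (fun d i =>
      let e := pvSortEdge (pvTriIdx t i.toNat) (pvTriIdx t (PySem.Int.mod (i + 1) 3).toNat)
      d.insert e (d.getD e 0 + 1)) d) PySem.Dict.empty

-- A's inner 'for edge in boundary_edges' search for the next connected edge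
def pvScanA (boundary : List (Int × Int)) (used : PySem.Set (Int × Int)) (last : Int) :
    Option ((Int × Int) × Int) :=
  match boundary with
  | [] => none
  | e :: rest =>
    if PySem.Set.contains used e then pvScanA rest used last
    else if e.1 = last then some (e, e.2)
    else if e.2 = last then some (e, e.1)
    else pvScanA rest used last

-- A's while-loop; polygon kept reversed (head = polygon[-1]); fuel bounds the while loop
def pvLoopA (boundary : List (Int × Int)) : Nat → PySem.Set (Int × Int) → List Int → List Int
  | 0, _, rev => rev
  | fuel+1, used, rev =>
    if used.length < boundary.length then
      match pvScanA boundary used (rev.headD 0) with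
      | some (e, v) => pvLoopA boundary fuel (PySem.Set.add used e) (v :: rev)
      | none => rev
    else rev

-- the 'if not boundary_edges … while … return polygon[:-1]' tail of A
def pvFinishA (boundary : List (Int × Int)) : List Int :=
  match boundary with
  | [] => []
  | e0 :: _ =>
    let rev := pvLoopA boundary boundary.length (PySem.Set.add PySem.Set.empty e0) [e0.2, e0.1]
    (rev.drop 1).reverse

def extract_polygon_from_triangles_py (triangles : List (Int × Int × Int)) : List Int :=
  pvFinishA (((pvCountA triangles).items.filter (fun p => p.2 == 1)).map (·.1))

-- ===== PORT B =====
-- edge-count loop of B (explicit pair list per triangle)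
def pvCountB (triangles : List (Int × Int × Int)) : PySem.Dict (Int × Int) Int :=
  triangles.foldl (fun d t =>
    [(t.1, t.2.1), (t.2.1, t.2.2), (t.2.2, t.1)].foldl (fun d uv =>
      let e := if uv.1 ≤ uv.2 then uv else (uv.2, uv.1)
      d.insert e (d.getD e 0 + 1)) d) PySem.Dict.empty

-- the adjacency entries one boundary edge contributes (the setdefault/append pairs)
def pvEntries (e : Int × Int) : List (Int × ((Int × Int) × Int)) :=
  [(e.1, (e, e.2))] ++ (if e.1 ≠ e.2 then [(e.2, (e, e.1))] else [])

-- adj: vertex -> list of (edge, other endpoint)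
def pvAdj (boundary : List (Int × Int)) : PySem.Dict Int (List ((Int × Int) × Int)) :=
  (boundary.flatMap pvEntries).foldl (fun d p => d.modify p.1 [] (· ++ [p.2])) PySem.Dict.empty

-- first unused incident entry (the 'next(...)' over adj[last])
def pvScanB (l : List ((Int × Int) × Int)) (used : PySem.Set (Int × Int)) :
    Option ((Int × Int) × Int) :=
  match l with
  | [] => none
  | (e, o) :: rest => if PySem.Set.contains used e then pvScanB rest used else some (e, o)

-- B's 'for _ in range(len(boundary)-1)' walk; polygon kept reversed
def pvLoopB (adj : PySem.Dict Int (List ((Int × Int) × Int))) :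
    Nat → PySem.Set (Int × Int) → List Int → List Int
  | 0, _, rev => rev
  | k+1, used, rev =>
    match pvScanB (adj.getD (rev.headD 0) []) used with
    | none => rev
    | some (e, o) => pvLoopB adj k (PySem.Set.add used e) (o :: rev)

-- the tail of B after the boundary list is built
def pvFinishB (boundary : List (Int × Int)) : List Int :=
  match boundary with
  | [] => []
  | e0 :: _ =>
    let rev := pvLoopB (pvAdj boundary) (boundary.length - 1)
      (PySem.Set.add PySem.Set.empty e0) [e0.2, e0.1]
    (rev.drop 1).reverse

def extract_polygon_from_triangles_py_alt (triangles : List (Int × Int × Int)) : List Int :=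
  pvFinishB (((pvCountB triangles).items.filter (fun p => p.2 == 1)).map (·.1))

-- ===== PRECONDITION & SPEC =====
def Spec_extract_polygon_from_triangles_py (triangles : List (Int × Int × Int)) (out : List Int) : Prop := out = extract_polygon_from_triangles_py_alt triangles
instance (triangles : List (Int × Int × Int)) (out : List Int) : Decidable (Spec_extract_polygon_from_triangles_py triangles out) := by unfold Spec_extract_polygon_from_triangles_py; infer_instance

-- ===== CLAIM (what is proved, stated in full; the proofs are below) =====
def Claim_equal_extract_polygon_from_triangles_py : Prop := ∀ (triangles : List (Int × Int × Int)), Dom_extract_polygon_from_triangles_py triangles → Spec_extract_polygon_from_triangles_py triangles (extract_polygon_from_triangles_py triangles)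

-- ===== LEMMAS AND PROOFS =====

theorem pvCount_eq (triangles : List (Int × Int × Int)) : pvCountA triangles = pvCountB triangles := rfl

-- the entries of adj[last] are exactly the incident entries of boundary, in order
theorem pvAdj_getD (boundary : List (Int × Int)) (last : Int) :
    (pvAdj boundary).getD last [] =
      ((boundary.flatMap pvEntries).filter (fun p => p.1 == last)).map (·.2) := by
  unfold pvAdj
  rw [PySem.Dict.getD_foldl_modify_append]
  simp

theorem pvScanB_append (xs ys : List ((Int × Int) × Int)) (used : PySem.Set (Int × Int)) :
    pvScanB (xs ++ ys) used =
      (match pvScanB xs used with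
       | some r => some r
       | none => pvScanB ys used) := by
  induction xs with
  | nil => simp [pvScanB]
  | cons p rest ih =>
    obtain ⟨e, o⟩ := p
    by_cases h : e ∈ used
    · simpa [pvScanB, h] using ih
    · simp [pvScanB, h]

theorem pvScan_eq (boundary : List (Int × Int)) (used : PySem.Set (Int × Int)) (last : Int) :
    pvScanB ((pvAdj boundary).getD last []) used = pvScanA boundary used last := by
  rw [pvAdj_getD]
  induction boundary with
  | nil => simp [pvScanA, pvScanB]
  | cons e rest ih =>
    obtain ⟨u, v⟩ := e
    rw [List.flatMap_cons, List.filter_append, List.map_append, pvScanB_append, ih]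
    by_cases hu : u = last
    · subst hu
      have hfil : ((pvEntries (u, v)).filter (fun p => p.1 == u)).map (·.2)
          = [((u, v), v)] := by
        by_cases huv : u = v
        · simp [pvEntries, huv]
        · simp [pvEntries, huv, Ne.symm huv]
      rw [hfil]
      by_cases hm : (u, v) ∈ used <;> simp [pvScanA, pvScanB, hm]
    · by_cases hv : v = last
      · subst hv
        have huv : u ≠ v := hu
        have hfil : ((pvEntries (u, v)).filter (fun p => p.1 == v)).map (·.2)
            = [((u, v), u)] := by
          simp [pvEntries, huv]
        rw [hfil]
        by_cases hm : (u, v) ∈ used <;> simp [pvScanA, pvScanB, hm, hu]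
      · have hfil : ((pvEntries (u, v)).filter (fun p => p.1 == last)).map (·.2)
            = [] := by
          by_cases huv : u = v <;> simp [pvEntries, hu, hv, huv]
        rw [hfil]
        by_cases hm : (u, v) ∈ used <;> simp [pvScanA, pvScanB, hm, hu, hv]

theorem pvScanA_not_mem (boundary : List (Int × Int)) (used : PySem.Set (Int × Int)) (last : Int)
    (e : Int × Int) (v : Int) (h : pvScanA boundary used last = some (e, v)) :
    PySem.Set.contains used e = false := by
  induction boundary with
  | nil => simp [pvScanA] at h
  | cons e' rest ih =>
    unfold pvScanA at h
    by_cases hm : PySem.Set.contains used e'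
    · rw [if_pos hm] at h; exact ih h
    · rw [if_neg hm] at h
      split_ifs at h with h1 h2
      · cases h; simpa using hm
      · cases h; simpa using hm
      · exact ih h

theorem pvLoop_eq (boundary : List (Int × Int)) (k : Nat) (used : PySem.Set (Int × Int))
    (rev : List Int) (hlen : used.length + k = boundary.length) :
    pvLoopA boundary (k + 1) used rev = pvLoopB (pvAdj boundary) k used rev := by
  induction k generalizing used rev with
  | zero =>
    unfold pvLoopA pvLoopB
    rw [if_neg (by omega)]
  | succ j ih =>
    unfold pvLoopA pvLoopB
    rw [if_pos (by omega), pvScan_eq]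
    cases h : pvScanA boundary used (rev.headD 0) with
    | none => rfl
    | some p =>
      obtain ⟨e, v⟩ := p
      have hnm : PySem.Set.contains used e = false := pvScanA_not_mem _ _ _ _ _ h
      have hadd : (PySem.Set.add used e).length = used.length + 1 := by
        rw [PySem.Set.add_of_not_mem (by simpa using hnm)]
        simp
      exact ih _ _ (by omega)

theorem pvFinish_eq (boundary : List (Int × Int)) : pvFinishA boundary = pvFinishB boundary := by
  cases boundary with
  | nil => rfl
  | cons e0 rest =>
    show (List.drop 1 (pvLoopA (e0 :: rest) (e0 :: rest).length
        (PySem.Set.add PySem.Set.empty e0) [e0.2, e0.1])).reverse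
      = (List.drop 1 (pvLoopB (pvAdj (e0 :: rest)) ((e0 :: rest).length - 1)
        (PySem.Set.add PySem.Set.empty e0) [e0.2, e0.1])).reverse
    have h1 : (PySem.Set.add (PySem.Set.empty (α := Int × Int)) e0).length = 1 := rfl
    have h2 : (e0 :: rest).length = rest.length + 1 := rfl
    rw [h2, Nat.add_sub_cancel,
      pvLoop_eq (e0 :: rest) rest.length _ _ (by rw [h1, h2]; omega)]

-- ===== VERDICT (by name: the statement is the Claim_ definition above) =====
theorem extract_polygon_from_triangles_py_spec : Claim_equal_extract_polygon_from_triangles_py := by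
  intro triangles _
  unfold Spec_extract_polygon_from_triangles_py
  unfold extract_polygon_from_triangles_py extract_polygon_from_triangles_py_alt
  rw [pvCount_eq, pvFinish_eq]
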